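-- pv_equiv track=rewrite | github.com/world-dv/Python_CodingTest | 1652.py | count
-- ===== SOURCE A (Python) =====
-- def count(x):
--     total = 0
--     for i in x:
--         a = ''.join(i).split('X')
--         for j in a:
--             if j.count('..') >= 1:
--                 total += 1
--     return total
-- ===== SOURCE B (Python) =====
-- def count(x):
--     total = 0
--     for i in x:
--         s = ''.join(i)
--         prev = None
--         has_pair = False
--         for c in s:
--             if c == 'X':
--                 if has_pair:
--                     total += 1
--                 has_pair = False
--                 prev = None
--             else:
--                 if prev == '.' and c == '.':
--                     has_pair = True
--                 prev = c
--         if has_pair: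
--             total += 1
--     return total
-- ===== Notes on version B (the rewrite author's own statement) =====
-- stated objective: alternative
-- what changed: Per row, instead of splitting the joined string on 'X' and running count('..') over each piece, B makes one character scan with a previous-char variable and a has-pair flag, flushing a segment at each 'X' and at end of string.
import Mathlib
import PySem

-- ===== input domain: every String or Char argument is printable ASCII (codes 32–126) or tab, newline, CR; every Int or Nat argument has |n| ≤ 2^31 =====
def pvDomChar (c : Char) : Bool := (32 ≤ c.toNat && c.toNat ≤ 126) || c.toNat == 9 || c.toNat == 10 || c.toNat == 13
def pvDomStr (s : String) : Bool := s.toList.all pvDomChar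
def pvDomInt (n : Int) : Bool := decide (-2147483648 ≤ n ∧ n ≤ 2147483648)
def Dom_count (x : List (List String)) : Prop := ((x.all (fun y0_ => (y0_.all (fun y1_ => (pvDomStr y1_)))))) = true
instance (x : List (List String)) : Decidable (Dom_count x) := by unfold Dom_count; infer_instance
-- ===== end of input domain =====

-- B replaces A's join/split('X')/count('..') per row by a single left-to-right scan with a
-- previous-character and a has-pair flag (alternative decomposition; same exact result, proved below).

-- ===== PORT A =====
-- ''.join(i) → PySem.Chars.join [] (PySem.Str.join is a thin wrapper over it);
-- .split('X') → PySem.Chars.splitOn (sep ≠ ''); j.count('..') → PySem.Chars.count (exact).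
def count (x : List (List String)) : Int :=
  x.foldl (fun total i =>
    (PySem.Chars.splitOn (PySem.Chars.join [] (i.map String.toList)) ['X']).foldl
      (fun t j => if 1 ≤ PySem.Chars.count j ['.', '.'] then t + 1 else t) total) 0

-- ===== PORT B =====
-- state = (total-so-far, prev, has_pair), exactly Source B's loop body
def countStep (st : Int × Option Char × Bool) (c : Char) : Int × Option Char × Bool :=
  if c == 'X' then ((if st.2.2 then st.1 + 1 else st.1), none, false)
  else (st.1, some c, st.2.2 || (st.2.1 == some '.' && c == '.'))

-- one row: scan the joined string, then flush the final segment
def countRow (s : List Char) : Int :=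
  let st := s.foldl countStep (0, none, false)
  if st.2.2 then st.1 + 1 else st.1

def count_alt (x : List (List String)) : Int :=
  x.foldl (fun total i => total + countRow (PySem.Chars.join [] (i.map String.toList))) 0

-- ===== PRECONDITION & SPEC =====
def Spec_count (x : List (List String)) (out : Int) : Prop := out = count_alt x
instance (x : List (List String)) (out : Int) : Decidable (Spec_count x out) := by unfold Spec_count; infer_instance

-- ===== CLAIM (what is proved, stated in full; the proofs are below) =====
def Claim_equal_count : Prop := ∀ (x : List (List String)), Dom_count x → Spec_count x (count x)

-- ===== LEMMAS AND PROOFS =====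

-- reference: does the list contain ".." (two consecutive dots)?
def hasDD : List Char → Bool
  | [] => false
  | [_] => false
  | a :: b :: t => (a == '.' && b == '.') || hasDD (b :: t)

-- B's pairing test threaded with a previous character
def ddFrom : Option Char → List Char → Bool
  | _, [] => false
  | prev, c :: t => (prev == some '.' && c == '.') || ddFrom (some c) t

-- reference splitter on 'X'
def segsH : List Char → List (List Char)
  | [] => [[]]
  | c :: t =>
    if c = 'X' then [] :: segsH t
    else
      match segsH t with
      | h :: r => (c :: h) :: r
      | [] => [[c]]

def mapHead (f : List Char → List Char) : List (List Char) → List (List Char)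
  | [] => []
  | h :: t => f h :: t

theorem segsH_ne_nil (s : List Char) : ∃ h r, segsH s = h :: r := by
  cases s with
  | nil => exact ⟨[], [], rfl⟩
  | cons c t =>
    by_cases hc : c = 'X'
    · exact ⟨[], segsH t, by simp [segsH, hc]⟩
    · obtain ⟨h, r, hr⟩ : ∃ h r, segsH t = h :: r := by
        clear hc
        induction t with
        | nil => exact ⟨[], [], rfl⟩
        | cons d u ih =>
          by_cases hd : d = 'X'
          · exact ⟨[], segsH u, by simp [segsH, hd]⟩
          · obtain ⟨h, r, hr⟩ := ih
            exact ⟨d :: h, r, by simp [segsH, hd, hr]⟩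
      exact ⟨c :: h, r, by simp [segsH, hc, hr]⟩

theorem splitOn_go_eq (fuel : Nat) : ∀ (l cur : List Char) (acc : List (List Char)),
    l.length < fuel →
    PySem.Chars.splitOn.go ['X'] fuel l cur acc
      = acc.reverse ++ mapHead (fun h => cur.reverse ++ h) (segsH l) := by
  induction fuel with
  | zero => intro l cur acc h; omega
  | succ f ih =>
    intro l cur acc h
    cases l with
    | nil => simp [PySem.Chars.splitOn.go, segsH, mapHead]
    | cons c rest =>
      by_cases hc : c = 'X'
      · have hpre : List.isPrefixOf ['X'] (c :: rest) = true := by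
          simp [List.isPrefixOf, hc]
        rw [PySem.Chars.splitOn.go]
        simp only [hpre, if_pos]
        rw [show List.drop (['X'].length) (c :: rest) = rest from rfl]
        rw [ih rest [] (cur.reverse :: acc) (by simpa using Nat.lt_of_succ_lt_succ h)]
        simp [segsH, hc, mapHead]
        cases hseg : segsH rest with
        | nil => obtain ⟨h', r', hr⟩ := segsH_ne_nil rest; simp [hr] at hseg
        | cons h' r' => simp [mapHead]
      · have hpre : List.isPrefixOf ['X'] (c :: rest) = false := by
          simp [List.isPrefixOf]
          intro hh; exact absurd hh.symm hc
        rw [PySem.Chars.splitOn.go]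
        simp only [hpre, Bool.false_eq_true, if_false]
        rw [ih rest (c :: cur) acc (by simpa using Nat.lt_of_succ_lt_succ h)]
        obtain ⟨h', r', hr⟩ := segsH_ne_nil rest
        simp [segsH, hc, hr, mapHead]

theorem splitOn_eq_segsH (s : List Char) :
    PySem.Chars.splitOn s ['X'] = segsH s := by
  unfold PySem.Chars.splitOn
  rw [splitOn_go_eq (s.length + 1) s [] [] (by omega)]
  obtain ⟨h, r, hr⟩ := segsH_ne_nil s
  simp [hr, mapHead]

theorem count_go_mono (fuel : Nat) : ∀ (l : List Char) (acc : Nat),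
    acc ≤ PySem.Chars.count.go ['.', '.'] fuel l acc := by
  induction fuel with
  | zero => intro l acc; rw [PySem.Chars.count.go] <;> simp
  | succ f ih =>
    intro l acc
    cases l with
    | nil => rw [PySem.Chars.count.go] <;> simp
    | cons c rest =>
      rw [PySem.Chars.count.go]
      by_cases hp : List.isPrefixOf ['.', '.'] (c :: rest) = true
      · simp only [hp, if_pos]
        exact le_trans (Nat.le_succ acc) (ih _ _)
      · simp only [eq_false_of_ne_true hp, Bool.false_eq_true, if_false]
        exact ih _ _

theorem count_go_pos (fuel : Nat) : ∀ (l : List Char) (acc : Nat),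
    l.length ≤ fuel →
    (1 ≤ PySem.Chars.count.go ['.', '.'] fuel l acc ↔ 1 ≤ acc ∨ hasDD l = true) := by
  induction fuel with
  | zero =>
    intro l acc h
    have : l = [] := List.length_eq_zero_iff.mp (Nat.le_zero.mp h)
    subst this
    rw [PySem.Chars.count.go]; simp [hasDD]
  | succ f ih =>
    intro l acc h
    cases l with
    | nil => rw [PySem.Chars.count.go] <;> simp [hasDD]
    | cons c rest =>
      rw [PySem.Chars.count.go]
      by_cases hp : List.isPrefixOf ['.', '.'] (c :: rest) = true
      · simp only [hp, if_pos]
        constructor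
        · intro _
          right
          cases rest with
          | nil => simp [List.isPrefixOf] at hp
          | cons b t =>
            simp [List.isPrefixOf] at hp
            simp [hasDD, hp.1.symm, hp.2.symm]
        · intro _
          exact le_trans (Nat.le_add_left 1 acc) (count_go_mono f _ _)
      · simp only [eq_false_of_ne_true hp, Bool.false_eq_true, if_false]
        rw [ih rest acc (by simpa using Nat.le_of_succ_le_succ h)]
        have heq : hasDD (c :: rest) = hasDD rest := by
          cases rest with
          | nil => simp [hasDD]
          | cons b t =>
            have hb : (c == '.' && b == '.') = false := by
              by_cases h1 : c = '.' <;> by_cases h2 : b = '.' <;> simp [h1, h2]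
              exact hp (by simp [List.isPrefixOf, h1, h2])
            simp [hasDD, hb]
        rw [heq]

theorem count_pos (j : List Char) :
    (1 ≤ PySem.Chars.count j ['.', '.']) ↔ hasDD j = true := by
  unfold PySem.Chars.count
  simp only [List.isEmpty, Bool.false_eq_true, if_false]
  rw [count_go_pos j.length j 0 le_rfl]
  simp

theorem ddFrom_some (t : List Char) : ∀ c, ddFrom (some c) t = hasDD (c :: t) := by
  induction t with
  | nil => intro c; simp [ddFrom, hasDD]
  | cons d u ih =>
    intro c
    simp only [ddFrom, hasDD, ih d]
    rfl

theorem ddFrom_none (l : List Char) : ddFrom none l = hasDD l := by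
  cases l with
  | nil => rfl
  | cons c t => simp [ddFrom, ddFrom_some]

theorem scan_eq (s : List Char) : ∀ (t : Int) (prev : Option Char) (hp : Bool),
    (let st := s.foldl countStep (t, prev, hp); if st.2.2 then st.1 + 1 else st.1)
      = t + (match segsH s with
             | h :: r => (if hp || ddFrom prev h then 1 else 0)
                          + (r.countP (fun j => hasDD j) : Int)
             | [] => 0) := by
  induction s with
  | nil => intro t prev hp; simp [segsH, ddFrom]; cases hp <;> simp
  | cons c s' ih =>
    intro t prev hp
    simp only [List.foldl_cons]
    by_cases hc : c = 'X'
    · have hstep : countStep (t, prev, hp) c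
          = ((if hp then t + 1 else t), none, false) := by
        simp [countStep, hc]
      rw [hstep, ih]
      obtain ⟨h, r, hr⟩ := segsH_ne_nil s'
      simp only [segsH, hc, if_pos, hr]
      simp [ddFrom, ddFrom_none, List.countP_cons]
      cases hp <;> cases hh : hasDD h <;> simp <;> ring
    · have hstep : countStep (t, prev, hp) c
          = (t, some c, hp || (prev == some '.' && c == '.')) := by
        simp [countStep, hc]
      rw [hstep, ih]
      obtain ⟨h, r, hr⟩ := segsH_ne_nil s'
      simp [segsH, hr, hc, ddFrom, ddFrom_some, Bool.or_assoc]

theorem countRow_eq (s : List Char) :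
    countRow s = ((segsH s).countP (fun j => hasDD j) : Int) := by
  unfold countRow
  rw [scan_eq s 0 none false]
  obtain ⟨h, r, hr⟩ := segsH_ne_nil s
  simp [hr, ddFrom_none, List.countP_cons]
  cases hh : hasDD h <;> simp <;> ring

theorem row_eq (total : Int) (i : List String) :
    (PySem.Chars.splitOn (PySem.Chars.join [] (i.map String.toList)) ['X']).foldl
      (fun t j => if 1 ≤ PySem.Chars.count j ['.', '.'] then t + 1 else t) total
    = total + countRow (PySem.Chars.join [] (i.map String.toList)) := by
  set s := PySem.Chars.join [] (i.map String.toList) with hs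
  rw [splitOn_eq_segsH, countRow_eq]
  have hfun : (fun (t : Int) (j : List Char) =>
        if 1 ≤ PySem.Chars.count j ['.', '.'] then t + 1 else t)
      = (fun (t : Int) (j : List Char) => if hasDD j = true then t + 1 else t) := by
    funext t j
    by_cases hj : hasDD j = true
    · simp [hj, (count_pos j).mpr hj]
    · have : ¬ (1 ≤ PySem.Chars.count j ['.', '.']) := fun hh => hj ((count_pos j).mp hh)
      simp [hj, this]
  rw [hfun]
  induction segsH s generalizing total with
  | nil => simp
  | cons h r ih =>
    simp only [List.foldl_cons, List.countP_cons]
    cases hh : hasDD h <;> simp [hh, ih] <;> push_cast <;> ring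

-- ===== VERDICT (by name: the statement is the Claim_ definition above) =====
theorem count_spec : Claim_equal_count := by
  intro x _
  unfold Spec_count count count_alt
  have : (fun (total : Int) (i : List String) =>
        (PySem.Chars.splitOn (PySem.Chars.join [] (i.map String.toList)) ['X']).foldl
          (fun t j => if 1 ≤ PySem.Chars.count j ['.', '.'] then t + 1 else t) total)
      = (fun (total : Int) (i : List String) =>
          total + countRow (PySem.Chars.join [] (i.map String.toList))) := by
    funext total i; exact row_eq total i
  rw [this]
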